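-- pv_equiv track=rewrite | github.com/developerQuo/20190911_PlayTango-BoardGame | source/widget_QnA.py | output_mp3
-- ===== SOURCE A (Python) =====
-- def output_mp3(mp3_tmp):
--     mp3_count = []
--     for count in mp3_tmp:
--         if len(count[-1]) > 2:
--             mp3_count.append(count[-1].count(',') + 1)
--         else:
--             # 언어 변경
--             if count[0] == 'en':
--                 mp3_count.append('')
--             else:
--                 mp3_count.append(0)
--
--     mp3_contents = ''
--     mp3_save_list = []
--     mp3_info = '{},{},{},{},\n'
--     mp3_save_list2 = []
--     for count in range(len(mp3_tmp)):
--         mp3_save_list2.append(mp3_info)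
--     mp3_save_list += mp3_save_list2
--
--     count = 0
--     for i in mp3_save_list:
--         mp3_contents += i.format(mp3_tmp[count][0], mp3_tmp[count][1],
--                                  mp3_count[count], mp3_tmp[count][2])
--         count += 1
--     return mp3_contents
-- ===== SOURCE B (Python) =====
-- def output_mp3(mp3_tmp):
--     # divide and conquer: split the row list in half, build each half's CSV text
--     # recursively, concatenate; a singleton row formats via ','.join of its fields
--     if not mp3_tmp:
--         return ''
--     if len(mp3_tmp) == 1:
--         row = mp3_tmp[0]
--         last = row[-1]
--         if len(last) > 2:
--             cnt = str(last.count(',') + 1)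
--         elif row[0] == 'en':
--             cnt = ''
--         else:
--             cnt = '0'
--         return ','.join((row[0], row[1], cnt, row[2], '')) + '\n'
--     mid = len(mp3_tmp) // 2
--     return output_mp3(mp3_tmp[:mid]) + output_mp3(mp3_tmp[mid:])
-- ===== Notes on version B (the rewrite author's own statement) =====
-- stated objective: alternative
-- what changed: A's three sequential loops (build an mp3_count list, build a list of n identical template strings, then a counter-indexed formatting loop accumulating with +=) are replaced by a divide-and-conquer recursion that halves the row list, formats a singleton row with ','.join of its fields, and concatenates the two halves' texts.
import Mathlib
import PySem

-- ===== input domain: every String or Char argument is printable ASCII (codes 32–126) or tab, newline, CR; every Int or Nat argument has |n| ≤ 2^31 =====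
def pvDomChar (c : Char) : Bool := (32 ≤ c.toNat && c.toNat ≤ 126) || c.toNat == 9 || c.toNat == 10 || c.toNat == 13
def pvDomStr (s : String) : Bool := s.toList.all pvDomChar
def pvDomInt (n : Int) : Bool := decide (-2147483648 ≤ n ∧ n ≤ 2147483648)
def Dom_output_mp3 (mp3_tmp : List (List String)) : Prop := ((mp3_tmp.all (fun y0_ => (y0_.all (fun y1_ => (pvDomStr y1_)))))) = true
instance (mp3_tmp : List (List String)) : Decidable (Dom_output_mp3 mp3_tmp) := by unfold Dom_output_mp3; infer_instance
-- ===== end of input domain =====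

-- B replaces A's three sequential loops by a divide-and-conquer recursion that halves
-- the row list and formats a singleton row with ','.join (objective: alternative).

-- ===== PORT A =====
-- the value A appends to mp3_count for one row: an int, or '' (none) for short 'en' rows
def pvACount (row : List String) : Option Int :=
  if 2 < PySem.Str.len (PySem.List.pyGetD row (-1) "") then
    some ((PySem.Str.count (PySem.List.pyGetD row (-1) "") "," : Int) + 1)
  else if PySem.List.pyGetD row 0 "" = "en" then none
  else some (0 : Int)

-- how '{}'.format renders such a value
def pvRenderCount (c : Option Int) : String :=
  match c with
  | none => ""
  | some k => PySem.Int.toStr k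

def output_mp3 (mp3_tmp : List (List String)) : String :=
  let mp3_count : List (Option Int) :=
    mp3_tmp.foldl (fun acc count => acc ++ [pvACount count]) []
  let mp3_save_list : List String :=
    ([] : List String) ++
      (PySem.List.pyRange 0 (mp3_tmp.length : Int) 1).foldl
        (fun acc _ => acc ++ ["{},{},{},{},\n"]) []
  let r := mp3_save_list.foldl
    (fun (st : String × Int) _ =>
      let row := PySem.List.pyGetD mp3_tmp st.2 []
      (st.1 ++ PySem.List.pyGetD row 0 "" ++ "," ++ PySem.List.pyGetD row 1 "" ++ "," ++
        pvRenderCount (PySem.List.pyGetD mp3_count st.2 none) ++ "," ++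
        PySem.List.pyGetD row 2 "" ++ ",\n", st.2 + 1))
    ("", 0)
  r.1

-- ===== PORT B =====
def output_mp3_alt (mp3_tmp : List (List String)) : String :=
  match mp3_tmp with
  | [] => ""
  | [row] =>
      let last := PySem.List.pyGetD row (-1) ""
      let cnt :=
        if 2 < PySem.Str.len last then PySem.Int.toStr ((PySem.Str.count last "," : Int) + 1)
        else if PySem.List.pyGetD row 0 "" = "en" then ""
        else "0"
      PySem.Str.join ","
        [PySem.List.pyGetD row 0 "", PySem.List.pyGetD row 1 "", cnt,
         PySem.List.pyGetD row 2 "", ""] ++ "\n"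
  | r1 :: r2 :: rest =>
      -- mid = len(mp3_tmp) // 2, used as the bound of both slices
      output_mp3_alt (PySem.List.slice (r1 :: r2 :: rest) none
        (some (PySem.Int.floordiv ((r1 :: r2 :: rest).length : Int) 2))) ++
      output_mp3_alt (PySem.List.slice (r1 :: r2 :: rest)
        (some (PySem.Int.floordiv ((r1 :: r2 :: rest).length : Int) 2)) none)
  termination_by mp3_tmp.length
  decreasing_by
    · have h2 : PySem.Int.floordiv (((r1 :: r2 :: rest).length : Nat) : Int) 2
          = (((r1 :: r2 :: rest).length / 2 : Nat) : Int) := by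
        exact_mod_cast PySem.Int.floordiv_natCast (r1 :: r2 :: rest).length 2
      rw [h2, PySem.List.slice_to_natCast]
      simp
      omega
    · have h2 : PySem.Int.floordiv (((r1 :: r2 :: rest).length : Nat) : Int) 2
          = (((r1 :: r2 :: rest).length / 2 : Nat) : Int) := by
        exact_mod_cast PySem.Int.floordiv_natCast (r1 :: r2 :: rest).length 2
      rw [h2, PySem.List.slice_from_natCast]
      simp
      omega

-- ===== PRECONDITION & SPEC =====
-- Pre_ excludes inputs with a row of fewer than 3 entries: there the Python A raises
-- IndexError (row[-1] on an empty row, row[1]/row[2] in the formatting loop), and so does B.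
def Pre_output_mp3 (mp3_tmp : List (List String)) : Prop :=
  ∀ row ∈ mp3_tmp, 3 ≤ row.length
instance (mp3_tmp : List (List String)) : Decidable (Pre_output_mp3 mp3_tmp) := by
  unfold Pre_output_mp3; infer_instance
def pvWitness_output_mp3 : List (List String) :=
  [["en", "t1", "a,b,c"], ["kr", "t2", "x"]]

def Spec_output_mp3 (mp3_tmp : List (List String)) (out : String) : Prop := out = output_mp3_alt mp3_tmp
instance (mp3_tmp : List (List String)) (out : String) : Decidable (Spec_output_mp3 mp3_tmp out) := by unfold Spec_output_mp3; infer_instance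

-- ===== CLAIM (what is proved, stated in full; the proofs are below) =====
def Claim_equal_output_mp3 : Prop := ∀ (mp3_tmp : List (List String)), Dom_output_mp3 mp3_tmp → Pre_output_mp3 mp3_tmp → Spec_output_mp3 mp3_tmp (output_mp3 mp3_tmp)

-- ===== LEMMAS AND PROOFS =====

-- B's count field (the value bound to cnt in Source B's base case)
def pvCountField (row : List String) : String :=
  let last := PySem.List.pyGetD row (-1) ""
  if 2 < PySem.Str.len last then PySem.Int.toStr ((PySem.Str.count last "," : Int) + 1)
  else if PySem.List.pyGetD row 0 "" = "en" then "" else "0"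

-- B's count field is exactly how A's stored count value renders in '{}'.format
theorem pvCountField_eq (row : List String) :
    pvCountField row = pvRenderCount (pvACount row) := by
  simp only [pvCountField, pvACount, pvRenderCount]
  split_ifs <;> rfl

-- the per-row line both programs emit, written as plain appends
def pvRowStr (row : List String) : String :=
  PySem.List.pyGetD row 0 "" ++ "," ++ PySem.List.pyGetD row 1 "" ++ "," ++
    pvCountField row ++ "," ++ PySem.List.pyGetD row 2 "" ++ ",\n"

-- ''.join peels one element at a time
theorem pvJoin_empty_cons (x : String) (xs : List String) :
    PySem.Str.join "" (x :: xs) = x ++ PySem.Str.join "" xs := by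
  cases xs with
  | nil =>
    apply String.toList_inj.mp
    simp [PySem.Str.toList_join, PySem.Chars.join_singleton, PySem.Chars.join_nil]
  | cons y ys =>
    apply String.toList_inj.mp
    simp [PySem.Str.toList_join, PySem.Chars.join_cons_cons]

-- ''.join distributes over ++
theorem pvJoin_empty_append (xs ys : List String) :
    PySem.Str.join "" (xs ++ ys) = PySem.Str.join "" xs ++ PySem.Str.join "" ys := by
  induction xs with
  | nil =>
    show PySem.Str.join "" ys = PySem.Str.join "" [] ++ PySem.Str.join "" ys
    have h : PySem.Str.join "" ([] : List String) = "" := rfl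
    rw [h, String.empty_append]
  | cons x xs ih =>
    rw [List.cons_append, pvJoin_empty_cons, pvJoin_empty_cons, ih, String.append_assoc]

-- B's singleton line is pvRowStr
theorem pvLine_eq (row : List String) :
    PySem.Str.join ","
        [PySem.List.pyGetD row 0 "", PySem.List.pyGetD row 1 "", pvCountField row,
         PySem.List.pyGetD row 2 "", ""] ++ "\n" = pvRowStr row := by
  apply String.toList_inj.mp
  simp [PySem.Str.toList_join, PySem.Chars.join, List.intercalate, List.intersperse, pvRowStr]

-- B computes ''.join of the per-row lines
theorem output_mp3_alt_eq_join (mp3_tmp : List (List String)) :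
    output_mp3_alt mp3_tmp = PySem.Str.join "" (mp3_tmp.map pvRowStr) := by
  induction mp3_tmp using output_mp3_alt.induct with
  | case1 =>
    show output_mp3_alt [] = _
    rw [output_mp3_alt]
    rfl
  | case2 row =>
    show output_mp3_alt [row] = _
    rw [output_mp3_alt]
    show (PySem.Str.join "," [_, _, pvCountField row, _, ""] ++ "\n") = _
    rw [pvLine_eq, List.map_cons, List.map_nil, pvJoin_empty_cons]
    have h : PySem.Str.join "" ([] : List String) = "" := rfl
    rw [h, String.append_empty]
  | case3 r1 r2 rest ih1 ih2 =>
    show output_mp3_alt (r1 :: r2 :: rest) = _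
    rw [output_mp3_alt]
    have h2 : PySem.Int.floordiv (((r1 :: r2 :: rest).length : Nat) : Int) 2
        = (((r1 :: r2 :: rest).length / 2 : Nat) : Int) := by
      exact_mod_cast PySem.Int.floordiv_natCast (r1 :: r2 :: rest).length 2
    rw [h2] at ih1 ih2 ⊢
    rw [PySem.List.slice_to_natCast] at ih1 ⊢
    rw [PySem.List.slice_from_natCast] at ih2 ⊢
    rw [ih1, ih2, ← pvJoin_empty_append, ← List.map_append, List.take_append_drop]

-- A's formatting loop, fold over a replicate of the template, walking the suffix l of full
theorem pvFold_main (full : List (List String)) :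
    ∀ (l pre : List (List String)) (s : String), full = pre ++ l →
    (List.foldl
      (fun (st : String × Int) (_ : String) =>
        let row := PySem.List.pyGetD full st.2 []
        (st.1 ++ PySem.List.pyGetD row 0 "" ++ "," ++ PySem.List.pyGetD row 1 "" ++ "," ++
          pvRenderCount (PySem.List.pyGetD (full.map pvACount) st.2 none) ++ "," ++
          PySem.List.pyGetD row 2 "" ++ ",\n", st.2 + 1))
      (s, (pre.length : Int)) (List.replicate l.length "{},{},{},{},\n")).1
      = s ++ PySem.Str.join "" (l.map pvRowStr) := by
  intro l
  induction l with
  | nil =>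
    intro pre s _
    show s = s ++ PySem.Str.join "" []
    have h : PySem.Str.join "" ([] : List String) = "" := rfl
    rw [h, String.append_empty]
  | cons row rest ih =>
    intro pre s hfull
    have hrow : PySem.List.pyGetD full (pre.length : Int) [] = row := by
      rw [PySem.List.pyGetD_natCast]
      subst hfull
      simp [List.getD]
    have hcnt : PySem.List.pyGetD (full.map pvACount) (pre.length : Int) none = pvACount row := by
      rw [PySem.List.pyGetD_natCast]
      subst hfull
      simp [List.getD]
    simp only [List.length_cons, List.replicate_succ, List.foldl_cons]
    have hstep :
        ((pre.length : Int) + 1) = (((pre ++ [row]).length : Nat) : Int) := by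
      simp
    rw [hrow, hcnt, hstep,
        ih (pre ++ [row]) _ (by simpa using hfull),
        List.map_cons, pvJoin_empty_cons]
    rw [← pvCountField_eq]
    simp [pvRowStr, String.append_assoc]

theorem output_mp3_eq (mp3_tmp : List (List String)) :
    output_mp3 mp3_tmp = output_mp3_alt mp3_tmp := by
  unfold output_mp3
  rw [output_mp3_alt_eq_join,
      PySem.List.foldl_append_singleton_eq_map, PySem.List.foldl_append_singleton_eq_map]
  simp only [List.nil_append, PySem.List.pyRange_zero_natCast, List.map_map]
  have hrep : (List.range mp3_tmp.length).map
      ((fun (_ : Int) => "{},{},{},{},\n") ∘ (fun (k : Nat) => (k : Int)))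
      = List.replicate mp3_tmp.length "{},{},{},{},\n" := by
    rw [show ((fun (_ : Int) => "{},{},{},{},\n") ∘ (fun (k : Nat) => (k : Int)))
          = (fun (_ : Nat) => "{},{},{},{},\n") from rfl,
        List.map_const', List.length_range]
  rw [hrep]
  have := pvFold_main mp3_tmp mp3_tmp [] "" (by simp)
  simp only [List.length_nil, Nat.cast_zero] at this
  rw [this]
  rfl

-- ===== VERDICT (by name: the statement is the Claim_ definition above) =====
theorem output_mp3_spec : Claim_equal_output_mp3 := by
  intro mp3_tmp _ _
  unfold Spec_output_mp3
  exact output_mp3_eq mp3_tmp
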